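-- pv_equiv track=rewrite | github.com/roboflow/inference | inference/core/workflows/execution_engine/executor/core.py | prepare_intersection_of_masks
-- ===== SOURCE A (Python) =====
-- from typing import Any, Dict, Generator, List, Optional, Set, Tuple, Union
--
-- def prepare_intersection_of_masks(
--     batch_masks: List[Set[Tuple[int, ...]]],
--     non_batch_masks: Set[bool],
-- ) -> Dict[int, Set[Tuple[int, ...]]]:
--     masks_dimensions = enumerate_masks_dimensions(batch_masks=batch_masks)
--     if False in non_batch_masks:
--         return {
--             dimension: set() for dimension in masks_dimensions
--         }  # empty set means nothing
--     return {
--         dimension: get_masks_intersection_up_to_dimension(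
--             batch_masks=batch_masks,
--             dimension=dimension,
--         )
--         for dimension in masks_dimensions
--     }
--
-- def enumerate_masks_dimensions(batch_masks: List[Set[Tuple[int, ...]]]) -> List[int]:
--     dimensions_spotted = set()
--     for batch_mask in batch_masks:
--         for mask_element in batch_mask:
--             dimensions_spotted.add(len(mask_element))
--     return sorted(list(dimensions_spotted))
--
-- def get_masks_intersection_up_to_dimension(
--     batch_masks: List[Set[Tuple[int, ...]]],
--     dimension: int,
-- ) -> Set[Tuple[int, ...]]:
--     batch_masks_in_dimension = [
--         {mask_element[:dimension] for mask_element in batch_mask}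
--         for batch_mask in batch_masks
--     ]
--     return set.intersection(*batch_masks_in_dimension)
-- ===== SOURCE B (Python) =====
-- from typing import Dict, List, Set, Tuple
--
--
-- def prepare_intersection_of_masks(
--     batch_masks: List[Set[Tuple[int, ...]]],
--     non_batch_masks: Set[bool],
-- ) -> Dict[int, Set[Tuple[int, ...]]]:
--     dimensions = sorted({len(element) for batch_mask in batch_masks for element in batch_mask})
--     if False in non_batch_masks:
--         return {dimension: set() for dimension in dimensions}
--     # Counting instead of set intersection: count, for every (dimension, prefix) pair,
--     # in how many batch masks that truncated element occurs; a prefix belongs to the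
--     # intersection at a dimension iff its count equals the number of batch masks, so the
--     # result is a filter of the first batch mask's prefixes by that count.
--     counts: Dict[Tuple[int, Tuple[int, ...]], int] = {}
--     for batch_mask in batch_masks:
--         for key in {(d, element[:d]) for d in dimensions for element in batch_mask}:
--             counts[key] = counts.get(key, 0) + 1
--     n = len(batch_masks)
--     return {
--         d: {element[:d] for element in batch_masks[0] if counts.get((d, element[:d]), 0) == n}
--         for d in dimensions
--     }
-- ===== Notes on version B (the rewrite author's own statement) =====
-- stated objective: alternative
-- what changed: B replaces A's per-dimension set.intersection over freshly built truncated sets by a counting algorithm: one global counter maps each (dimension, truncated element) to the number of batch masks containing it, and each dimension's result is the first batch mask's prefixes filtered by count == len(batch_masks).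
import Mathlib
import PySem

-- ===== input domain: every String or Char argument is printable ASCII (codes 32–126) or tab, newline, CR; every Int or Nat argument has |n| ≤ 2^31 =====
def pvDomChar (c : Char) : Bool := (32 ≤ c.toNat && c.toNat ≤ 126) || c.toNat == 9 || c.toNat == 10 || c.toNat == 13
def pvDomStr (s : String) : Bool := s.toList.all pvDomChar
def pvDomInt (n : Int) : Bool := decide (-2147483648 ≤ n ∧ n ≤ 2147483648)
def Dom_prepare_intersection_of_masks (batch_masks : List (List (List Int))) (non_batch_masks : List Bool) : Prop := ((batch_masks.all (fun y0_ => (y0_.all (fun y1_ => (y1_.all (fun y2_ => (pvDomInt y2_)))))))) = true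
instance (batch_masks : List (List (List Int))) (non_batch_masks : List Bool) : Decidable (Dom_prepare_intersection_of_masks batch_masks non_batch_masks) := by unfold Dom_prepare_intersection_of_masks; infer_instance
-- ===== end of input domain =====

-- B replaces A's per-dimension set.intersection over rebuilt truncated sets by a counting
-- algorithm (a global (dimension, prefix) → number-of-masks counter, then a filter of the
-- first mask's prefixes by count == len(batch_masks)); same cost, equal RETURN value proved.

-- ===== PORT A =====
-- enumerate_masks_dimensions
def pvEnumDimsA (batch_masks : List (List (List Int))) : List Int :=
  PySem.List.sorted
    (batch_masks.foldl
      (fun ds bm => bm.foldl (fun ds e => PySem.Set.add ds ((e.length : Int))) ds)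
      PySem.Set.empty)
    (fun x => x) false

-- get_masks_intersection_up_to_dimension; Python's set.intersection(*[]) raises, but A only calls
-- this with batch_masks nonempty (a dimension exists), so the [] branch is unreachable.
def pvInterUpToA (batch_masks : List (List (List Int))) (dimension : Int) : List (List Int) :=
  match batch_masks.map
      (fun bm => PySem.Set.ofList (bm.map (fun e => PySem.List.slice e none (some dimension)))) with
  | [] => []
  | s :: rest => rest.foldl PySem.Set.inter s

def prepare_intersection_of_masks (batch_masks : List (List (List Int))) (non_batch_masks : List Bool) : List (Int × List (List Int)) :=
  let masks_dimensions := pvEnumDimsA batch_masks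
  if non_batch_masks.contains false then
    masks_dimensions.map (fun d => (d, ([] : List (List Int))))
  else
    masks_dimensions.map (fun d => (d, pvInterUpToA batch_masks d))

-- ===== PORT B =====
def pvDimsB (batch_masks : List (List (List Int))) : List Int :=
  PySem.List.sorted
    (PySem.Set.ofList ((batch_masks.flatMap (fun bm => bm)).map (fun e => ((e.length : Int)))))
    (fun x => x) false

-- {(d, element[:d]) for d in dimensions for element in batch_mask}
def pvKeysB (dims : List Int) (bm : List (List Int)) : PySem.Set (Int × List Int) :=
  PySem.Set.ofList (dims.flatMap (fun d => bm.map (fun e => (d, PySem.List.slice e none (some d)))))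

-- for batch_mask in batch_masks: for key in {…}: counts[key] = counts.get(key, 0) + 1
def pvCountsB (dims : List Int) (batch_masks : List (List (List Int))) :
    PySem.Dict (Int × List Int) Int :=
  batch_masks.foldl
    (fun counts bm =>
      (pvKeysB dims bm).foldl (fun counts key => counts.insert key (counts.getD key 0 + 1)) counts)
    PySem.Dict.empty

def prepare_intersection_of_masks_alt (batch_masks : List (List (List Int))) (non_batch_masks : List Bool) : List (Int × List (List Int)) :=
  let dims := pvDimsB batch_masks
  if non_batch_masks.contains false then
    dims.map (fun d => (d, ([] : List (List Int))))
  else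
    let counts := pvCountsB dims batch_masks
    let n : Int := batch_masks.length
    -- batch_masks[0] is only reached when a dimension exists, i.e. batch_masks ≠ []
    dims.map (fun d => (d,
      PySem.Set.ofList
        (((PySem.List.pyGetD batch_masks 0 []).filter
            (fun e => counts.getD (d, PySem.List.slice e none (some d)) 0 == n)).map
          (fun e => PySem.List.slice e none (some d)))))

-- ===== PRECONDITION & SPEC =====
def Spec_prepare_intersection_of_masks (batch_masks : List (List (List Int))) (non_batch_masks : List Bool) (out : List (Int × List (List Int))) : Prop := out = prepare_intersection_of_masks_alt batch_masks non_batch_masks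
instance (batch_masks : List (List (List Int))) (non_batch_masks : List Bool) (out : List (Int × List (List Int))) : Decidable (Spec_prepare_intersection_of_masks batch_masks non_batch_masks out) := by unfold Spec_prepare_intersection_of_masks; infer_instance

-- ===== CLAIM (what is proved, stated in full; the proofs are below) =====
def Claim_equal_prepare_intersection_of_masks : Prop := ∀ (batch_masks : List (List (List Int))) (non_batch_masks : List Bool), Dom_prepare_intersection_of_masks batch_masks non_batch_masks → Spec_prepare_intersection_of_masks batch_masks non_batch_masks (prepare_intersection_of_masks batch_masks non_batch_masks)

-- ===== LEMMAS AND PROOFS =====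

-- the two dimension enumerations agree: nested add-loop = set comprehension over the flattening
lemma foldl_add_flatMap (bms : List (List (List Int))) (init : PySem.Set Int) :
    bms.foldl (fun ds bm => bm.foldl (fun ds e => PySem.Set.add ds ((e.length : Int))) ds) init =
      ((bms.flatMap (fun bm => bm)).map (fun e => ((e.length : Int)))).foldl PySem.Set.add init := by
  induction bms generalizing init with
  | nil => rfl
  | cons bm rest ih =>
      simp only [List.foldl_cons, List.flatMap_cons, List.map_append, List.foldl_append, ih,
        List.foldl_map]

lemma dims_eq (batch_masks : List (List (List Int))) : pvEnumDimsA batch_masks = pvDimsB batch_masks := by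
  unfold pvEnumDimsA pvDimsB
  rw [PySem.Set.ofList_eq_foldl, foldl_add_flatMap]
  rfl

lemma discard_eq_filter {α : Type} [BEq α] [LawfulBEq α] (s : PySem.Set α) (x : α) :
    PySem.Set.discard s x = s.filter (fun y => y != x) := rfl

-- dedup commutes with a value-level filter: set(filter) = filter(set)
lemma ofList_filter {α : Type} [BEq α] [LawfulBEq α] (l : List α) (q : α → Bool) :
    PySem.Set.ofList (l.filter q) = (PySem.Set.ofList l).filter q := by
  induction l with
  | nil => rfl
  | cons x xs ih =>
      rw [List.filter_cons, PySem.Set.ofList_cons, List.filter_cons]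
      by_cases hq : q x
      · simp only [hq, if_pos]
        rw [PySem.Set.ofList_cons, ih]
        show _ = x :: List.filter q (PySem.Set.discard (PySem.Set.ofList xs) x)
        rw [discard_eq_filter, discard_eq_filter, List.filter_filter, List.filter_filter]
        congr 1
        exact List.filter_congr (fun y _ => by rw [Bool.and_comm])
      · simp only [hq, Bool.false_eq_true, if_neg, not_false_iff, ih, discard_eq_filter,
          List.filter_filter]
        refine List.filter_congr (fun y _ => ?_)
        cases hyx : (y != x)
        · simp only [bne_eq_false_iff_eq] at hyx; subst hyx
          simp [hq]
        · simp

-- a fold of pairwise intersections is one filter by membership in every set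
lemma foldl_inter (ts : List (PySem.Set (List Int))) (s : PySem.Set (List Int)) :
    ts.foldl PySem.Set.inter s = s.filter (fun p => ts.all (fun t => PySem.Set.contains t p)) := by
  induction ts generalizing s with
  | nil => simp
  | cons t ts ih =>
      rw [List.foldl_cons, ih]
      show (s.filter (fun x => PySem.Set.contains t x)).filter _ = _
      rw [List.filter_filter]
      refine List.filter_congr (fun p _ => ?_)
      simp only [List.all_cons]
      exact Bool.and_comm _ _

-- the counter holds, at each key, the number of batch masks whose key set contains it
lemma counts_getD (dims : List Int) (bms : List (List (List Int)))
    (d0 : PySem.Dict (Int × List Int) Int) (k : Int × List Int) :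
    (bms.foldl
        (fun counts bm =>
          (pvKeysB dims bm).foldl (fun counts key => counts.insert key (counts.getD key 0 + 1)) counts)
        d0).getD k 0
      = d0.getD k 0 + (bms.countP (fun bm => decide (k ∈ pvKeysB dims bm)) : Int) := by
  induction bms generalizing d0 with
  | nil => simp
  | cons bm rest ih =>
      rw [List.foldl_cons, ih, PySem.Dict.getD_foldl_insert_add_one,
        List.count_eq_countP, List.countP_cons]
      have hc : (pvKeysB dims bm).countP (fun x => x == k) = if k ∈ pvKeysB dims bm then 1 else 0 := by
        rw [← List.count_eq_countP]
        exact List.Nodup.count (PySem.Set.nodup_ofList _)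
      rw [hc]
      by_cases hm : k ∈ pvKeysB dims bm <;> simp [hm] <;> omega

lemma mem_keysB (dims : List Int) (bm : List (List Int)) (d : Int) (p : List Int) :
    (d, p) ∈ pvKeysB dims bm ↔ d ∈ dims ∧ ∃ e ∈ bm, p = PySem.List.slice e none (some d) := by
  simp only [pvKeysB, PySem.Set.mem_ofList, List.mem_flatMap, List.mem_map]
  constructor
  · rintro ⟨d', hd', e, he, heq⟩
    injection heq with h1 h2
    exact ⟨h1 ▸ hd', e, he, by rw [← h2, h1]⟩
  · rintro ⟨hd, e, he, hp⟩
    exact ⟨d, hd, e, he, by rw [hp]⟩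

-- ===== VERDICT (by name: the statement is the Claim_ definition above) =====
theorem prepare_intersection_of_masks_spec : Claim_equal_prepare_intersection_of_masks := by
  intro bms nbm _
  unfold Spec_prepare_intersection_of_masks prepare_intersection_of_masks prepare_intersection_of_masks_alt
  rw [dims_eq]
  split
  · rfl
  · refine List.map_congr_left ?_
    intro d hd
    refine Prod.ext rfl ?_
    show pvInterUpToA bms d = _
    -- a dimension exists, so bms is nonempty
    cases bms with
    | nil => exact absurd hd (by simp [pvDimsB, PySem.List.sorted])
    | cons bm0 rest =>
        simp only
        rw [show PySem.List.pyGetD (bm0 :: rest) 0 [] = bm0 by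
          simp [PySem.List.pyGetD, PySem.List.pyGet?, PySem.List.pyIdx?]]
        -- B's entry as a filter of the deduplicated prefixes of the first mask
        have hmapfil : (bm0.filter
              (fun e => (pvCountsB (pvDimsB (bm0 :: rest)) (bm0 :: rest)).getD
                  (d, PySem.List.slice e none (some d)) 0 == ((bm0 :: rest).length : Int))).map
              (fun e => PySem.List.slice e none (some d))
            = (bm0.map (fun e => PySem.List.slice e none (some d))).filter
                (fun p => (pvCountsB (pvDimsB (bm0 :: rest)) (bm0 :: rest)).getD (d, p) 0
                    == ((bm0 :: rest).length : Int)) := by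
          rw [List.filter_map]
          rfl
        rw [hmapfil, ofList_filter]
        -- A's entry as the same filter
        show (rest.map fun bm => PySem.Set.ofList
            (bm.map (fun e => PySem.List.slice e none (some d)))).foldl PySem.Set.inter
            (PySem.Set.ofList (bm0.map (fun e => PySem.List.slice e none (some d)))) = _
        rw [foldl_inter]
        refine List.filter_congr ?_
        intro p hp
        rw [PySem.Set.mem_ofList] at hp
        -- both predicates say: p is a prefix of every other batch mask
        have hcnt : (pvCountsB (pvDimsB (bm0 :: rest)) (bm0 :: rest)).getD (d, p) 0
            = (((bm0 :: rest).countP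
                (fun bm => decide ((d, p) ∈ pvKeysB (pvDimsB (bm0 :: rest)) bm))) : Int) := by
          simp only [pvCountsB, counts_getD, PySem.Dict.getD_empty, zero_add]
        show _ = ((pvCountsB (pvDimsB (bm0 :: rest)) (bm0 :: rest)).getD (d, p) 0
            == ((bm0 :: rest).length : Int))
        rw [hcnt]
        have hmem0 : (d, p) ∈ pvKeysB (pvDimsB (bm0 :: rest)) bm0 := by
          rw [mem_keysB]
          obtain ⟨e, he, hpe⟩ := List.mem_map.mp hp
          exact ⟨hd, e, he, hpe.symm⟩
        rw [List.countP_cons_of_pos (by simpa using hmem0), List.length_cons]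
        have hle := List.countP_le_length
          (p := fun bm => decide ((d, p) ∈ pvKeysB (pvDimsB (bm0 :: rest)) bm)) (l := rest)
        rw [Bool.eq_iff_iff, List.all_map, List.all_eq_true]
        constructor
        · intro hall
          have : rest.countP (fun bm => decide ((d, p) ∈ pvKeysB (pvDimsB (bm0 :: rest)) bm))
              = rest.length := by
            rw [List.countP_eq_length]
            intro bm hbm
            have hmemb : p ∈ bm.map (fun e => PySem.List.slice e none (some d)) := by
              simpa using hall bm hbm
            exact decide_eq_true ((mem_keysB _ _ _ _).mpr ⟨hd, List.mem_map.mp hmemb |>.imp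
              (fun e ⟨he, hpe⟩ => ⟨he, hpe.symm⟩)⟩)
          simp [this]
        · intro heq bm hbm
          have heq' : rest.countP (fun bm => decide ((d, p) ∈ pvKeysB (pvDimsB (bm0 :: rest)) bm))
              = rest.length := by
            have h := eq_of_beq heq
            have h2 : rest.countP (fun bm => decide ((d, p) ∈ pvKeysB (pvDimsB (bm0 :: rest)) bm)) + 1
                = rest.length + 1 := by exact_mod_cast h
            omega
          have := (List.countP_eq_length).mp heq' bm hbm
          obtain ⟨_, e, he, hpe⟩ := (mem_keysB _ _ _ _).mp (of_decide_eq_true this)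
          have : p ∈ bm.map (fun e => PySem.List.slice e none (some d)) :=
            List.mem_map.mpr ⟨e, he, hpe.symm⟩
          simpa using this
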